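-- pv_equiv track=rewrite | github.com/brentcollins/honbot-django | honbot/match.py | recent_matches
-- ===== SOURCE A (Python) =====
-- def recent_matches(match_json, results):
--     """
--     returns specifed number of recent matches and win loss status as bool
--     """
--     if match_json[0]['history'] is not None:
--         data = match_json[0]['history'].split(',')
--         matches = []
--         temp = []
--         for i in data:
--             temp = i.split('|')
--             try:
--                 temp.pop(1)
--             except:
--                 pass
--             if len(matches) > 0:
--                 if matches[-1][0] != temp[0]:
--                     matches.append(temp)
--             else:
--                 matches.append(temp)
--         matches.reverse()
--         return matches[:results]
--     else:
--         matches = []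
--         return matches
-- ===== SOURCE B (Python) =====
-- def _fields(tok):
--     e = tok.split('|')
--     return e[:1] + e[2:]
--
--
-- def recent_matches(match_json, results):
--     """
--     returns specifed number of recent matches and win loss status as bool
--     """
--     history = match_json[0]['history']
--     if history is None:
--         return []
--     parsed = [_fields(tok) for tok in history.split(',')]
--     # stateless pairwise dedupe: an entry is kept iff its predecessor has a
--     # different first field; built directly in reversed order, first entry last
--     out = [cur for prev, cur in reversed(list(zip(parsed, parsed[1:])))
--            if prev[0] != cur[0]]
--     out.append(parsed[0])
--     return out[:results]
-- ===== Notes on version B (the rewrite author's own statement) =====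
-- stated objective: alternative
-- what changed: B replaces A's stateful dedupe loop (compare each entry against the last element kept in a growing accumulator, then reverse the whole list) with a stateless pairwise filter over zip(parsed, parsed[1:]) traversed in reverse, building the output directly back-to-front, correct because an entry is kept by A exactly when its immediate predecessor has a different first field.
import Mathlib
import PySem

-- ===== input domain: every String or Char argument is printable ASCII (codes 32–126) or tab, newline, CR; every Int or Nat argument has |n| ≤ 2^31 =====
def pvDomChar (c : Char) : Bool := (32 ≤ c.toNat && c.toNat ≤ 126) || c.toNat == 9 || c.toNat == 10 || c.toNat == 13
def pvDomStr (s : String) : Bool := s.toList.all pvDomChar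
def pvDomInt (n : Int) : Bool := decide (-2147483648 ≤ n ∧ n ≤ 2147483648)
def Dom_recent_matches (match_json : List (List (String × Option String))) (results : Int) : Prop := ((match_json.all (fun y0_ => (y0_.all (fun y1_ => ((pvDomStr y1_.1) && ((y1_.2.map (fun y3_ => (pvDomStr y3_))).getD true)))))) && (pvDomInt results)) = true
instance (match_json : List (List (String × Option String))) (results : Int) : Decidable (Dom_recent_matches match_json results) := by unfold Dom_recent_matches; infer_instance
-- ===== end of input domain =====

-- ===== PORT A =====
-- B replaces A's stateful dedupe (compare each entry against the last KEPT element of a growing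
-- accumulator, then reverse) with a stateless pairwise filter over adjacent zip pairs, traversed
-- in reverse so the output is built directly back-to-front (alternative decomposition; same cost).

-- s.split(sep) for a NONEMPTY literal sep, where PySem.Str.split? is exact and always `some`
def rmSplit (s sep : String) : List String :=
  (PySem.Str.split? s sep).getD [s]

-- ===== PORT A =====
def recent_matches (match_json : List (List (String × Option String))) (results : Int) : List (List String) :=
  match match_json with
  | [] => []  -- match_json[0] raises IndexError: excluded by Pre_
  | d :: _ =>
    match d.lookup "history" with
    | none => []  -- KeyError: excluded by Pre_
    | some none => []  -- else branch: history is None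
    | some (some h) =>
      let data := rmSplit h ","
      let ms := data.foldl (fun ms i =>
        let temp := rmSplit i "|"
        let temp := match PySem.List.pop? temp 1 with  -- try: temp.pop(1) except: pass
          | some (_, rest) => rest
          | none => temp
        if ms.length > 0 then
          if (PySem.List.pyGet? ms (-1)).bind (fun m => PySem.List.pyGet? m 0) ≠
              PySem.List.pyGet? temp 0 then
            ms ++ [temp]
          else ms
        else ms ++ [temp]) []
      PySem.List.slice ms.reverse none (some results)

-- ===== PORT B =====
-- _fields(tok) = tok.split('|')[:1] + tok.split('|')[2:]
def rmFields (tok : String) : List String :=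
  let e := rmSplit tok "|"
  e.take 1 ++ e.drop 2

def recent_matches_alt (match_json : List (List (String × Option String))) (results : Int) : List (List String) :=
  match match_json with
  | [] => []
  | d :: _ =>
    match d.lookup "history" with
    | none => []
    | some none => []
    | some (some h) =>
      let parsed := (rmSplit h ",").map rmFields
      -- [cur for prev, cur in reversed(list(zip(parsed, parsed[1:]))) if prev[0] != cur[0]]
      let out := ((parsed.zip parsed.tail).reverse.filter
          (fun pc => !(PySem.List.pyGet? pc.1 0 == PySem.List.pyGet? pc.2 0))).map (·.2)
      -- out.append(parsed[0]); parsed is never empty (split(',') yields ≥ 1 token), headD is a totality guard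
      let out := out ++ [parsed.headD []]
      PySem.List.slice out none (some results)

-- ===== PRECONDITION & SPEC =====
-- Pre_ excludes exactly the inputs where Python A raises: empty match_json (IndexError) or a
-- first dict without the key 'history' (KeyError).
def Pre_recent_matches (match_json : List (List (String × Option String))) (results : Int) : Prop :=
  match_json ≠ [] ∧ ((match_json.headD []).lookup "history").isSome = true
instance (match_json : List (List (String × Option String))) (results : Int) : Decidable (Pre_recent_matches match_json results) := by unfold Pre_recent_matches; infer_instance

def pvWitness_recent_matches : (List (List (String × Option String))) × Int :=
  ([[("history", some "12|w,34|l,34|l,56|w")]], 3)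

def Spec_recent_matches (match_json : List (List (String × Option String))) (results : Int) (out : List (List String)) : Prop := out = recent_matches_alt match_json results
instance (match_json : List (List (String × Option String))) (results : Int) (out : List (List String)) : Decidable (Spec_recent_matches match_json results out) := by unfold Spec_recent_matches; infer_instance

-- ===== CLAIM (what is proved, stated in full; the proofs are below) =====
def Claim_equal_recent_matches : Prop := ∀ (match_json : List (List (String × Option String))) (results : Int), Dom_recent_matches match_json results → Pre_recent_matches match_json results → Spec_recent_matches match_json results (recent_matches match_json results)

-- ===== LEMMAS AND PROOFS =====

-- split(sep).go always produces at least one piece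
theorem rm_go_ne_nil (sep : List Char) (fuel : Nat) (l cur : List Char) (acc : List (List Char)) :
    PySem.Chars.splitOn.go sep fuel l cur acc ≠ [] := by
  induction fuel generalizing l cur acc with
  | zero => simp [PySem.Chars.splitOn.go]
  | succ f ih =>
    cases l with
    | nil => simp [PySem.Chars.splitOn.go]
    | cons c rest =>
      rw [PySem.Chars.splitOn.go]
      split <;> exact ih _ _ _

theorem rmSplit_ne_nil (s : String) : rmSplit s "," ≠ [] := by
  have h1 : PySem.Chars.split? s.toList [','] = some (PySem.Chars.splitOn s.toList [',']) := by
    simp [PySem.Chars.split?]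
  have h2 := rm_go_ne_nil [','] (s.toList.length + 1) s.toList [] []
  simp [rmSplit, PySem.Str.split?, h1, PySem.Chars.splitOn] at *
  intro h
  exact h2 (by simpa using h)

-- A's pop(1)-guarded trim equals the take/drop parsing shared via rmFields
theorem rm_pop_eq_fields (tok : String) :
    (match PySem.List.pop? (rmSplit tok "|") 1 with
      | some (_, rest) => rest
      | none => rmSplit tok "|") = rmFields tok := by
  unfold rmFields
  cases h : rmSplit tok "|" with
  | nil => simp [PySem.List.pop?]
  | cons a t =>
    cases t with
    | nil => simp [PySem.List.pop?, PySem.List.pyIdx?]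
    | cons b t' => simp [PySem.List.pop?, PySem.List.pyIdx?, List.eraseIdx]

-- characterisation of A's dedupe as runs (proof-side only)
def rmRuns : List (List String) → List (List String)
  | [] => []
  | e :: rest =>
    e :: rmRuns (rest.dropWhile (fun x => PySem.List.pyGet? x 0 == PySem.List.pyGet? e 0))
termination_by l => l.length
decreasing_by
  simpa using Nat.lt_succ_of_le (List.length_dropWhile_le _ _)

-- A's fold step, named for the proofs
def rmStep (acc : List (List String)) (temp : List String) : List (List String) :=
  if acc.length > 0 then
    if (PySem.List.pyGet? acc (-1)).bind (fun m => PySem.List.pyGet? m 0) ≠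
        PySem.List.pyGet? temp 0 then
      acc ++ [temp]
    else acc
  else acc ++ [temp]

theorem rm_foldl_go (n : Nat) (l pre : List (List String)) (z : List String) (hn : l.length ≤ n) :
    l.foldl rmStep (pre ++ [z]) =
      pre ++ [z] ++ rmRuns (l.dropWhile (fun x => PySem.List.pyGet? x 0 == PySem.List.pyGet? z 0)) := by
  induction n generalizing l pre z with
  | zero =>
    have : l = [] := List.length_eq_zero_iff.mp (Nat.le_zero.mp hn)
    subst this; simp [rmRuns]
  | succ n ih =>
    cases l with
    | nil => simp [rmRuns]
    | cons e rest =>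
      simp only [List.length_cons, Nat.succ_le_succ_iff] at hn
      have hlast : (PySem.List.pyGet? (pre ++ [z]) (-1)).bind (fun m => PySem.List.pyGet? m 0)
          = PySem.List.pyGet? z 0 := by
        rw [PySem.List.pyGet?_neg_one_append_singleton]; rfl
      by_cases hk : PySem.List.pyGet? e 0 = PySem.List.pyGet? z 0
      · have hstep : rmStep (pre ++ [z]) e = pre ++ [z] := by
          simp [rmStep, hk]
        have hdrop : (e :: rest).dropWhile (fun x => PySem.List.pyGet? x 0 == PySem.List.pyGet? z 0)
            = rest.dropWhile (fun x => PySem.List.pyGet? x 0 == PySem.List.pyGet? z 0) := by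
          rw [List.dropWhile_cons_of_pos]; simpa using hk
        rw [List.foldl_cons, hstep, hdrop]
        exact ih rest pre z hn
      · have hstep : rmStep (pre ++ [z]) e = (pre ++ [z]) ++ [e] := by
          simp only [rmStep, hlast]
          have : PySem.List.pyGet? z 0 ≠ PySem.List.pyGet? e 0 := fun h => hk h.symm
          simp [this]
        have hdrop : (e :: rest).dropWhile (fun x => PySem.List.pyGet? x 0 == PySem.List.pyGet? z 0)
            = e :: rest := by
          rw [List.dropWhile_cons_of_neg]; simpa using hk
        rw [List.foldl_cons, hstep, hdrop, rmRuns]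
        have := ih rest (pre ++ [z]) e hn
        rw [this]
        simp

theorem rm_foldl_eq_runs (l : List (List String)) :
    l.foldl rmStep [] = rmRuns l := by
  cases l with
  | nil => simp [rmRuns]
  | cons e rest =>
    have h0 : rmStep [] e = [] ++ [e] := by simp [rmStep]
    rw [List.foldl_cons, h0, rm_foldl_go rest.length rest [] e le_rfl, rmRuns]
    simp

-- B's pairwise selection, named recursively for the proofs
def rmPairSel : List (List String) → List (List String)
  | a :: b :: t =>
    (if PySem.List.pyGet? a 0 == PySem.List.pyGet? b 0 then [] else [b]) ++ rmPairSel (b :: t)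
  | _ => []

theorem rm_zip_filter_eq_pairSel (l : List (List String)) :
    ((l.zip l.tail).filter
        (fun pc => !(PySem.List.pyGet? pc.1 0 == PySem.List.pyGet? pc.2 0))).map (·.2)
      = rmPairSel l := by
  induction l with
  | nil => simp [rmPairSel]
  | cons a t ih =>
    cases t with
    | nil => simp [rmPairSel]
    | cons b t' =>
      simp only [List.tail_cons, List.zip_cons_cons, List.filter_cons]
      by_cases hk : PySem.List.pyGet? a 0 = PySem.List.pyGet? b 0
      · simp only [rmPairSel, hk]
        simpa using ih
      · simp only [rmPairSel]
        have : (PySem.List.pyGet? a 0 == PySem.List.pyGet? b 0) = false := by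
          simpa using hk
        simp only [this]
        simp
        simpa using ih

theorem rm_runs_eq_pairSel (t : List (List String)) (a : List String) :
    rmRuns (a :: t) = a :: rmPairSel (a :: t) := by
  induction t generalizing a with
  | nil => simp [rmRuns, rmPairSel]
  | cons b t' ih =>
    by_cases hk : PySem.List.pyGet? b 0 = PySem.List.pyGet? a 0
    · have hih := ih b
      rw [rmRuns] at hih
      rw [rmRuns, List.dropWhile_cons_of_pos (by simpa using hk)]
      have hpred : (fun x => PySem.List.pyGet? x 0 == PySem.List.pyGet? a 0)
          = (fun x => PySem.List.pyGet? x 0 == PySem.List.pyGet? b 0) := by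
        funext x; rw [hk]
      have hsel : rmPairSel (a :: b :: t') = rmPairSel (b :: t') := by
        rw [rmPairSel]
        simp [hk.symm]
      rw [hpred, hsel, (List.cons_injective.eq_iff.mp hih)]
    · have hih := ih b
      rw [rmRuns, List.dropWhile_cons_of_neg (by simpa using hk)]
      have hsel : rmPairSel (a :: b :: t') = b :: rmPairSel (b :: t') := by
        rw [rmPairSel]
        have : (PySem.List.pyGet? a 0 == PySem.List.pyGet? b 0) = false := by
          simp; exact fun h => hk h.symm
        simp [this]
      rw [hsel, hih]

theorem rm_rev_runs_eq_out (parsed : List (List String)) (hne : parsed ≠ []) :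
    (rmRuns parsed).reverse =
      ((parsed.zip parsed.tail).reverse.filter
          (fun pc => !(PySem.List.pyGet? pc.1 0 == PySem.List.pyGet? pc.2 0))).map (·.2)
        ++ [parsed.headD []] := by
  match parsed, hne with
  | p :: ps, _ =>
    rw [List.filter_reverse, List.map_reverse, rm_zip_filter_eq_pairSel,
      rm_runs_eq_pairSel]
    simp

-- ===== VERDICT (by name: the statement is the Claim_ definition above) =====
theorem recent_matches_spec : Claim_equal_recent_matches := by
  intro mj results _ hpre
  unfold Spec_recent_matches
  match mj with
  | [] => exact absurd rfl hpre.1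
  | d :: rest =>
    cases hl : d.lookup "history" with
    | none =>
      exact absurd hpre.2 (by simp [List.headD, hl])
    | some o =>
      cases o with
      | none => simp only [recent_matches, recent_matches_alt, hl]
      | some h =>
        simp only [recent_matches, recent_matches_alt, hl]
        have hfun : (fun (ms : List (List String)) (i : String) =>
            let temp := rmSplit i "|"
            let temp := match PySem.List.pop? temp 1 with
              | some (_, rest) => rest
              | none => temp
            if ms.length > 0 then
              if (PySem.List.pyGet? ms (-1)).bind (fun m => PySem.List.pyGet? m 0) ≠
                  PySem.List.pyGet? temp 0 then ms ++ [temp]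
              else ms
            else ms ++ [temp]) = (fun acc i => rmStep acc (rmFields i)) := by
          funext acc i
          rw [← rm_pop_eq_fields i]
          rfl
        rw [hfun, ← List.foldl_map, rm_foldl_eq_runs,
          rm_rev_runs_eq_out ((rmSplit h ",").map rmFields)
            (by simpa using rmSplit_ne_nil h)]
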